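-- pv_equiv track=rewrite | github.com/kakao/pycon2016apac-gawibawibo | 0813/player_ykhl1itj.py | opp_choose_win_counter
-- ===== SOURCE A (Python) =====
-- def myScore(opp_score):
--     if opp_score == 3:
--         return 0
--     elif opp_score == 1:
--         return 1
--     else:
--         return 3
--
-- def opp_choose_win_counter(records):
--     gawiSum, bawiSum, boSum = 0, 0, 0
--     for rec in records:
--         if rec[0] == "gawi":
--             gawiSum += myScore(rec[1])
--         elif rec[0] == "bawi":
--             bawiSum += myScore(rec[1])
--         else:
--             boSum += myScore(rec[1])
--     statList = [('gawi', gawiSum), ('bawi', bawiSum), ('bo', boSum)]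
--     statList = sorted(statList, key = lambda x:x[1])
--     if statList[0][0] == "gawi":
--         return "bo"
--     elif statList[0][0] == "bawi":
--         return "gawi"
--     else:
--         return "bawi"
-- ===== SOURCE B (Python) =====
-- def opp_choose_win_counter(records):
--     # Staged per-category passes: for each candidate choice, sum its points
--     # over the filtered records; pick the first minimum with min(); map to counter.
--     def pts(s):
--         return 0 if s == 3 else 1 if s == 1 else 3
--
--     def cat(name):
--         return name if name in ("gawi", "bawi") else "bo"
--
--     win = min(("gawi", "bawi", "bo"),
--               key=lambda c: sum(pts(s) for n, s in records if cat(n) == c))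
--     return {"gawi": "bo", "bawi": "gawi", "bo": "bawi"}[win]
-- ===== Notes on version B (the rewrite author's own statement) =====
-- stated objective: alternative
-- what changed: B replaces A's single pass with three named accumulators plus a stable sort by three staged filter-and-sum passes (one per candidate choice), a first-minimum min() scan over the candidates, and a counter-move dictionary lookup.
import Mathlib
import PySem

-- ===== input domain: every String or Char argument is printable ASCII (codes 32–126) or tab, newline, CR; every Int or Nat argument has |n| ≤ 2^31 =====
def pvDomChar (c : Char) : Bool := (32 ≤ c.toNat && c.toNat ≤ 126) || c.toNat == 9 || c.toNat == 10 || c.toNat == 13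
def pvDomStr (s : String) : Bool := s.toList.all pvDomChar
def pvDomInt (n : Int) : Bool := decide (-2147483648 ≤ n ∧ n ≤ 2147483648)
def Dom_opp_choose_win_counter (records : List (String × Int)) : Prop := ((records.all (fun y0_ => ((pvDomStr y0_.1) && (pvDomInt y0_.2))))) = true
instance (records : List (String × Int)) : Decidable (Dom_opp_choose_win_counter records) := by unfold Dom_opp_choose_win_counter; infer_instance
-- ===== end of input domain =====

-- B replaces A's one-pass three-accumulator loop plus stable sort by three staged
-- filter-and-sum passes, a first-minimum min() scan and a counter dict lookup (objective: alternative).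


-- ===== PORT A =====
def myScore (opp_score : Int) : Int :=
  if opp_score == 3 then 0
  else if opp_score == 1 then 1
  else 3

def opp_choose_win_counter (records : List (String × Int)) : String :=
  let s := records.foldl
    (fun (acc : Int × Int × Int) rec =>
      if rec.1 == "gawi" then (acc.1 + myScore rec.2, acc.2.1, acc.2.2)
      else if rec.1 == "bawi" then (acc.1, acc.2.1 + myScore rec.2, acc.2.2)
      else (acc.1, acc.2.1, acc.2.2 + myScore rec.2)) (0, 0, 0)
  let statList := [("gawi", s.1), ("bawi", s.2.1), ("bo", s.2.2)]
  let statList := PySem.List.sorted statList (fun x => x.2) false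
  -- statList has 3 elements, so statList[0] never raises; headD transliterates statList[0]
  if (statList.headD ("", 0)).1 == "gawi" then "bo"
  else if (statList.headD ("", 0)).1 == "bawi" then "gawi"
  else "bawi"

-- ===== PORT B =====
-- B-side helpers (Source B's pts and cat)
def altPts (s : Int) : Int := if s == 3 then 0 else if s == 1 then 1 else 3
def altCat (name : String) : String := if name == "gawi" || name == "bawi" then name else "bo"

def opp_choose_win_counter_alt (records : List (String × Int)) : String :=
  -- per-candidate key: sum of pts over the records filtered to that category
  let key := fun (c : String) =>
    (records.filter (fun r => altCat r.1 == c)).foldl (fun a r => a + altPts r.2) 0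
  -- min over a nonempty tuple never raises; getD transliterates that total call
  let win := (PySem.List.min? ["gawi", "bawi", "bo"] key).getD ""
  -- dict lookup counter[win]: win is always a key, so the KeyError branch is unreachable
  (PySem.Dict.ofList [("gawi", "bo"), ("bawi", "gawi"), ("bo", "bawi")]).getD win ""

-- ===== PRECONDITION & SPEC =====
def Spec_opp_choose_win_counter (records : List (String × Int)) (out : String) : Prop := out = opp_choose_win_counter_alt records
instance (records : List (String × Int)) (out : String) : Decidable (Spec_opp_choose_win_counter records out) := by unfold Spec_opp_choose_win_counter; infer_instance

-- ===== CLAIM =====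
def Claim_equal_opp_choose_win_counter : Prop := ∀ (records : List (String × Int)), Dom_opp_choose_win_counter records → Spec_opp_choose_win_counter records (opp_choose_win_counter records)

-- ===== LEMMAS AND PROOFS =====

-- proof-only helper: the triple of running sums A's loop computes
def aFold (records : List (String × Int)) (init : Int × Int × Int) : Int × Int × Int :=
  records.foldl
    (fun (acc : Int × Int × Int) rec =>
      if rec.1 == "gawi" then (acc.1 + myScore rec.2, acc.2.1, acc.2.2)
      else if rec.1 == "bawi" then (acc.1, acc.2.1 + myScore rec.2, acc.2.2)
      else (acc.1, acc.2.1, acc.2.2 + myScore rec.2)) init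

-- proof-only helper: B's per-category filter-sum
def bSum (records : List (String × Int)) (c : String) : Int :=
  (records.filter (fun r => altCat r.1 == c)).foldl (fun a r => a + altPts r.2) 0

lemma foldl_shift (l : List (String × Int)) (x : Int) :
    l.foldl (fun a r => a + altPts r.2) x = x + l.foldl (fun a r => a + altPts r.2) 0 := by
  induction l generalizing x with
  | nil => simp
  | cons r t ih => simp only [List.foldl_cons]; rw [ih (x + altPts r.2), ih (0 + altPts r.2)]; ring

lemma bSum_cons (r : String × Int) (rest : List (String × Int)) (c : String) :
    bSum (r :: rest) c = (if altCat r.1 == c then altPts r.2 else 0) + bSum rest c := by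
  unfold bSum
  by_cases h : altCat r.1 == c <;>
    simp [List.filter_cons, h] <;> rw [foldl_shift]

-- the three filter-sums equal A's three accumulators
lemma sums_eq (records : List (String × Int)) :
    bSum records "gawi" = (aFold records (0, 0, 0)).1 ∧
    bSum records "bawi" = (aFold records (0, 0, 0)).2.1 ∧
    bSum records "bo" = (aFold records (0, 0, 0)).2.2 := by
  suffices h : ∀ g b o : Int,
      (aFold records (g, b, o)).1 = g + bSum records "gawi" ∧
      (aFold records (g, b, o)).2.1 = b + bSum records "bawi" ∧
      (aFold records (g, b, o)).2.2 = o + bSum records "bo" by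
    have := h 0 0 0; omega
  induction records with
  | nil => intro g b o; simp [aFold, bSum]
  | cons r rest ih =>
    intro g b o
    have hpts : myScore r.2 = altPts r.2 := by simp [myScore, altPts]
    have hg2 := bSum_cons r rest "gawi"
    have hb2 := bSum_cons r rest "bawi"
    have ho2 := bSum_cons r rest "bo"
    by_cases hg : r.1 = "gawi"
    · have := ih (g + myScore r.2) b o
      simp only [aFold, List.foldl_cons] at this ⊢
      simp [hg, altCat] at hg2 hb2 ho2
      simp [hg, hpts] at this ⊢
      omega
    · by_cases hb : r.1 = "bawi"
      · have := ih g (b + myScore r.2) o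
        simp only [aFold, List.foldl_cons] at this ⊢
        simp [hg, hb, altCat] at hg2 hb2 ho2
        simp [hg, hb, hpts] at this ⊢
        omega
      · have := ih g b (o + myScore r.2)
        simp only [aFold, List.foldl_cons] at this ⊢
        simp [hg, hb, altCat] at hg2 hb2 ho2
        simp [hg, hb, hpts] at this ⊢
        omega

-- A's sort-then-index selection equals B's min-scan-plus-dict selection on the same three sums.
lemma select_eq (g b o : Int) (key : String → Int)
    (hg : key "gawi" = g) (hb : key "bawi" = b) (ho : key "bo" = o) :
    (let statList := PySem.List.sorted [("gawi", g), ("bawi", b), ("bo", o)] (fun x => x.2) false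
     if (statList.headD ("", 0)).1 == "gawi" then "bo"
     else if (statList.headD ("", 0)).1 == "bawi" then "gawi"
     else "bawi")
    = (PySem.Dict.ofList [("gawi", "bo"), ("bawi", "gawi"), ("bo", "bawi")]).getD
        ((PySem.List.min? ["gawi", "bawi", "bo"] key).getD "") "" := by
  by_cases h1 : b < g <;> by_cases h2 : o < b <;> by_cases h3 : o < g <;>
    simp [PySem.List.sorted, PySem.List.insertBy, PySem.List.min?, hg, hb, ho,
      PySem.Dict.ofList, PySem.Dict.getD, PySem.Dict.get?, PySem.Dict.update,
      PySem.Dict.insert, PySem.Dict.empty, PySem.Dict.contains, h1, h2, h3] <;>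
    split_ifs <;> first | rfl | (exfalso; omega)

-- ===== VERDICT =====
theorem opp_choose_win_counter_spec : Claim_equal_opp_choose_win_counter := by
  intro records _
  unfold Spec_opp_choose_win_counter opp_choose_win_counter opp_choose_win_counter_alt
  obtain ⟨e1, e2, e3⟩ := sums_eq records
  simp only [aFold] at e1 e2 e3
  simp only [bSum] at e1 e2 e3
  exact select_eq _ _ _ _ e1 e2 e3
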